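-- pv_equiv track=rewrite | github.com/Ciro-Taranto/AoC_2023 | day19_2021/day19_2021.py | find_correspondences
-- ===== SOURCE A (Python) =====
-- from collections import Counter, defaultdict
--
-- def find_correspondences(
--     matching_pairs: list[tuple[tuple[int, int], tuple[int, int]]]
-- ) -> dict[int, int]:
--     correspondences = defaultdict(set)
--     for (a1, b1), (a2, b2) in matching_pairs:
--         correspondences[a1].add(a2)
--         correspondences[b1].add(b2)
--     if any(len(val) > 1 for val in correspondences.values()):
--         raise ValueError
--     correspondences = {key: val.pop() for key, val in correspondences.items()}
--     return correspondences
-- ===== SOURCE B (Python) =====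
-- def find_correspondences(
--     matching_pairs: list[tuple[tuple[int, int], tuple[int, int]]]
-- ) -> dict[int, int]:
--     result = {}
--     for (a1, b1), (a2, b2) in matching_pairs:
--         for key, value in ((a1, a2), (b1, b2)):
--             if key in result:
--                 if result[key] != value:
--                     raise ValueError
--             else:
--                 result[key] = value
--     return result
-- ===== Notes on version B (the rewrite author's own statement) =====
-- stated objective: simpler
-- what changed: Replaces A's three passes (build a defaultdict of sets, an any() validation scan, a pop-collapse dict comprehension) with one pass over the pairs that keeps a plain dict[int,int] and detects a conflicting reassignment inline, raising ValueError immediately.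
import Mathlib
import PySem

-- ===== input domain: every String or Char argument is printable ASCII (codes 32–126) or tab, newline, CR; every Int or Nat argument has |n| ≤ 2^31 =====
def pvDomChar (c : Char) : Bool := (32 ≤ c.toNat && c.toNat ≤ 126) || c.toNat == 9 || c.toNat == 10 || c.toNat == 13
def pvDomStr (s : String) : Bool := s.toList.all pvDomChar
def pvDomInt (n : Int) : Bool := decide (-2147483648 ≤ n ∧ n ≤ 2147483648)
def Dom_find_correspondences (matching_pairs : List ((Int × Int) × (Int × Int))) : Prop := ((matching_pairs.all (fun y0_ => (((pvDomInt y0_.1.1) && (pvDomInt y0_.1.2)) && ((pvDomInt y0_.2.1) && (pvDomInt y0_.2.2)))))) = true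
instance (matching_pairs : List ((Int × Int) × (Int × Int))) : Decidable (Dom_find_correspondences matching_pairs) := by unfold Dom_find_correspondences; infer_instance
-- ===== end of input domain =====

-- B replaces A's three passes (defaultdict-of-sets build, any() validation scan, pop-collapse
-- comprehension) with one pass keeping a plain dict[int,int] and inline conflict detection (simpler).

-- ===== PORT A =====
-- correspondences[x].add(y) on the defaultdict(set) = modify with default empty set
def find_correspondences (matching_pairs : List ((Int × Int) × (Int × Int))) : List (Int × Int) :=
  let correspondences : PySem.Dict Int (PySem.Set Int) :=
    matching_pairs.foldl (fun d p =>
      let d := d.modify p.1.1 PySem.Set.empty (fun s => PySem.Set.add s p.2.1)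
      d.modify p.1.2 PySem.Set.empty (fun s => PySem.Set.add s p.2.2)) PySem.Dict.empty
  if correspondences.values.any (fun v => v.length > 1) then
    []  -- Python raises ValueError here; excluded by Pre_find_correspondences
  else
    -- {key: val.pop() for key, val in correspondences.items()}: every val is a singleton set here,
    -- so set.pop() deterministically returns its single element (headD is exact on singletons)
    correspondences.items.map (fun kv => (kv.1, kv.2.headD 0))

-- ===== PORT B =====
-- one step of B's inner loop: check-then-assign; none = bare `raise ValueError`
def pvBStep (d : PySem.Dict Int Int) (k v : Int) : Option (PySem.Dict Int Int) :=
  match d.get? k with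
  | some w => if w = v then some d else none
  | none => some (d.insert k v)

def find_correspondences_alt (matching_pairs : List ((Int × Int) × (Int × Int))) : List (Int × Int) :=
  let result : Option (PySem.Dict Int Int) :=
    matching_pairs.foldl (fun st p =>
      (st.bind (fun d => pvBStep d p.1.1 p.2.1)).bind (fun d => pvBStep d p.1.2 p.2.2))
      (some PySem.Dict.empty)
  match result with
  | some d => d.items
  | none => []  -- Python raises ValueError here; excluded by Pre_find_correspondences

-- ===== PRECONDITION & SPEC =====
-- the key→value pairs both programs record, in processing order
def pvEntries (matching_pairs : List ((Int × Int) × (Int × Int))) : List (Int × Int) :=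
  matching_pairs.flatMap (fun p => [(p.1.1, p.2.1), (p.1.2, p.2.2)])

-- A raises ValueError exactly when some key is mapped to two different values; those inputs
-- (on which B raises too) are excluded. Pre_ holds iff the recorded pairs are functionally consistent.
def Pre_find_correspondences (matching_pairs : List ((Int × Int) × (Int × Int))) : Prop :=
  ∀ p ∈ pvEntries matching_pairs, ∀ q ∈ pvEntries matching_pairs, p.1 = q.1 → p.2 = q.2
instance (matching_pairs : List ((Int × Int) × (Int × Int))) : Decidable (Pre_find_correspondences matching_pairs) := by unfold Pre_find_correspondences; infer_instance

def pvWitness_find_correspondences : (List ((Int × Int) × (Int × Int))) := [((0, 1), (5, 6)), ((1, 2), (6, 7))]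

def Spec_find_correspondences (matching_pairs : List ((Int × Int) × (Int × Int))) (out : List (Int × Int)) : Prop := out = find_correspondences_alt matching_pairs
instance (matching_pairs : List ((Int × Int) × (Int × Int))) (out : List (Int × Int)) : Decidable (Spec_find_correspondences matching_pairs out) := by unfold Spec_find_correspondences; infer_instance

-- ===== CLAIM (what is proved, stated in full; the proofs are below) =====
def Claim_equal_find_correspondences : Prop := ∀ (matching_pairs : List ((Int × Int) × (Int × Int))), Dom_find_correspondences matching_pairs → Pre_find_correspondences matching_pairs → Spec_find_correspondences matching_pairs (find_correspondences matching_pairs)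

-- ===== LEMMAS AND PROOFS =====

-- view of an int-valued dict as the corresponding dict of singleton sets
def pvLift (d : PySem.Dict Int Int) : PySem.Dict Int (PySem.Set Int) :=
  ⟨d.items.map (fun p => (p.1, [p.2]))⟩

-- the canonical one-step update both programs perform
def pvCStep (d : PySem.Dict Int Int) (e : Int × Int) : PySem.Dict Int Int :=
  if d.contains e.1 then d else d.insert e.1 e.2

theorem pvLift_get? (d : PySem.Dict Int Int) (k : Int) :
    (pvLift d).get? k = (d.get? k).map (fun v => [v]) := by
  simp [pvLift, PySem.Dict.get?, List.find?_map, Function.comp_def]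

theorem pvLift_contains (d : PySem.Dict Int Int) (k : Int) :
    (pvLift d).contains k = d.contains k := by
  simp [pvLift, PySem.Dict.contains, List.any_map, Function.comp_def]

theorem pvLift_keys (d : PySem.Dict Int Int) :
    (pvLift d).keys = d.keys := by
  simp [pvLift, PySem.Dict.keys, List.map_map, Function.comp_def]

-- inserting the value already stored at k changes nothing
theorem pvInsert_same {ν : Type} (d : PySem.Dict Int ν) (k : Int) (w : ν)
    (hn : d.keys.Nodup) (hw : d.get? k = some w) : d.insert k w = d := by
  have hc : d.contains k = true := by
    rw [PySem.Dict.contains_eq_isSome_get?, hw]; rfl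
  have : d.items.map (fun p => if p.1 == k then (k, w) else p) = d.items := by
    have := List.map_congr_left (l := d.items)
      (f := fun p => if p.1 == k then (k, w) else p) (g := id) ?_
    · simpa using this
    · intro p hp
      by_cases h : p.1 = k
      · have hmem : (k, p.2) ∈ d.items := by rw [← h]; exact hp
        have hkv := PySem.Dict.get?_of_mem_items d hmem hn
        rw [hw] at hkv
        have h2 : p.2 = w := (Option.some.inj hkv).symm
        simp only [h, beq_self_eq_true, if_pos, id]
        rw [← h2, ← h]
      · simp [h]
  calc d.insert k w = ⟨d.items.map (fun p => if p.1 == k then (k, w) else p)⟩ := by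
        simp [PySem.Dict.insert, hc]
    _ = d := by rw [this]

-- one A-step on the lifted dict is the canonical step, lifted
theorem pvStepA_lift (d : PySem.Dict Int Int) (k v : Int) (hn : d.keys.Nodup)
    (hc : ∀ w, d.get? k = some w → w = v) :
    (pvLift d).modify k PySem.Set.empty (fun s => PySem.Set.add s v) = pvLift (pvCStep d (k, v)) := by
  simp only [PySem.Dict.modify, pvCStep]
  by_cases h : d.contains k = true
  · obtain ⟨w, hw⟩ : ∃ w, d.get? k = some w := by
      rw [PySem.Dict.contains_eq_isSome_get?] at h
      exact Option.isSome_iff_exists.mp h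
    have hv : w = v := hc w hw
    have hg : (pvLift d).get? k = some [v] := by rw [pvLift_get?, hw, hv]; rfl
    have hgD : (pvLift d).getD k PySem.Set.empty = [v] :=
      PySem.Dict.getD_of_get?_eq_some _ _ hg
    have hadd : PySem.Set.add [v] v = [v] := PySem.Set.add_of_mem (by simp)
    rw [hgD, hadd, if_pos h]
    exact pvInsert_same _ _ _ (by rw [pvLift_keys]; exact hn) hg
  · have hcf : d.contains k = false := by simpa using h
    have hg : d.get? k = none := by
      rw [PySem.Dict.contains_eq_isSome_get?] at hcf
      simpa using hcf
    have hg' : (pvLift d).get? k = none := by rw [pvLift_get?, hg]; rfl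
    have hgD : (pvLift d).getD k PySem.Set.empty = PySem.Set.empty :=
      PySem.Dict.getD_of_get?_eq_none _ _ hg'
    have hlc : (pvLift d).contains k = false := by rw [pvLift_contains]; exact hcf
    rw [hgD, if_neg h]
    simp only [PySem.Set.add, PySem.Set.empty, PySem.Dict.insert, hcf, pvLift,
      Bool.false_eq_true, ite_false]
    simp
    intro x hx
    have : d.contains k = true := by
      simp only [PySem.Dict.contains, List.any_eq_true]
      exact ⟨(k, x), hx, by simp⟩
    rw [this] at hcf; cases hcf

-- one B-step succeeds and is the canonical step
theorem pvStepB_eq (d : PySem.Dict Int Int) (k v : Int)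
    (hc : ∀ w, d.get? k = some w → w = v) :
    pvBStep d k v = some (pvCStep d (k, v)) := by
  unfold pvBStep pvCStep
  cases hg : d.get? k with
  | some w =>
      have hcont : d.contains k = true := by
        rw [PySem.Dict.contains_eq_isSome_get?, hg]; rfl
      simp [hc w hg, hcont]
  | none =>
      have hcont : d.contains k = false := by
        rw [PySem.Dict.contains_eq_isSome_get?, hg]; rfl
      simp [hcont]

-- lookups in the canonical dict stay consistent with a consistent entry list
theorem pvCStep_get? (d : PySem.Dict Int Int) (e : Int × Int) (k : Int) (w : Int)
    (h : (pvCStep d e).get? k = some w) :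
    d.get? k = some w ∨ (k = e.1 ∧ w = e.2) := by
  unfold pvCStep at h
  by_cases hc : d.contains e.1 = true
  · rw [if_pos hc] at h; exact Or.inl h
  · rw [if_neg (by simpa using hc)] at h
    by_cases hk : k = e.1
    · subst hk
      rw [PySem.Dict.get?_insert_self] at h
      exact Or.inr ⟨rfl, (Option.some.injEq _ _).mp h.symm⟩
    · rw [PySem.Dict.get?_insert_of_ne _ _ hk] at h
      exact Or.inl h

theorem pvCStep_nodup (d : PySem.Dict Int Int) (e : Int × Int) (hn : d.keys.Nodup) :
    (pvCStep d e).keys.Nodup := by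
  unfold pvCStep
  split
  · exact hn
  · exact PySem.Dict.nodup_keys_insert _ _ _ hn

-- the main invariant: over a consistent entry list, A's fold is the lift of the canonical
-- fold and B's fold succeeds with the canonical fold
theorem pvFold_main (es : List (Int × Int)) (d : PySem.Dict Int Int)
    (hn : d.keys.Nodup)
    (h : ∀ p ∈ es, ∀ q ∈ es, p.1 = q.1 → p.2 = q.2)
    (hc : ∀ p ∈ es, ∀ w, d.get? p.1 = some w → w = p.2) :
    es.foldl (fun a e => a.modify e.1 PySem.Set.empty (fun s => PySem.Set.add s e.2)) (pvLift d)
      = pvLift (es.foldl pvCStep d)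
    ∧ es.foldl (fun st e => st.bind (fun a => pvBStep a e.1 e.2)) (some d)
      = some (es.foldl pvCStep d) := by
  induction es generalizing d with
  | nil => exact ⟨rfl, rfl⟩
  | cons e es ih =>
      have hce : ∀ w, d.get? e.1 = some w → w = e.2 := hc e (by simp)
      have hstepA := pvStepA_lift d e.1 e.2 hn hce
      have hstepB := pvStepB_eq d e.1 e.2 hce
      have hn' := pvCStep_nodup d e hn
      have h' : ∀ p ∈ es, ∀ q ∈ es, p.1 = q.1 → p.2 = q.2 := by
        intro p hp q hq; exact h p (by simp [hp]) q (by simp [hq])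
      have hc' : ∀ p ∈ es, ∀ w, (pvCStep d e).get? p.1 = some w → w = p.2 := by
        intro p hp w hw
        rcases pvCStep_get? d e p.1 w hw with hold | ⟨hk, hv⟩
        · exact hc p (by simp [hp]) w hold
        · rw [hv]
          exact h e (by simp) p (by simp [hp]) hk.symm
      obtain ⟨ihA, ihB⟩ := ih (pvCStep d e) hn' h' hc'
      refine ⟨?_, ?_⟩
      · simp only [List.foldl_cons, hstepA]; exact ihA
      · simp only [List.foldl_cons, Option.bind_some, hstepB]; exact ihB

theorem pvFoldl_pairs_eq_entries {α : Type} (f : α → Int × Int → α)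
    (mp : List ((Int × Int) × (Int × Int))) (init : α) :
    mp.foldl (fun a p => f (f a (p.1.1, p.2.1)) (p.1.2, p.2.2)) init
      = (pvEntries mp).foldl f init := by
  induction mp generalizing init with
  | nil => rfl
  | cons p mp ih => simp [pvEntries, List.flatMap_cons] at ih ⊢; exact ih _

-- ===== VERDICT (by name: the statement is the Claim_ definition above) =====
theorem find_correspondences_spec : Claim_equal_find_correspondences := by
  intro mp _ hpre
  unfold Spec_find_correspondences find_correspondences find_correspondences_alt
  have hn : (PySem.Dict.empty : PySem.Dict Int Int).keys.Nodup := PySem.Dict.nodup_keys_empty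
  have hc : ∀ p ∈ pvEntries mp, ∀ w,
      (PySem.Dict.empty : PySem.Dict Int Int).get? p.1 = some w → w = p.2 := by
    intro p _ w hw; rw [PySem.Dict.get?_empty] at hw; cases hw
  obtain ⟨hA, hB⟩ := pvFold_main (pvEntries mp) PySem.Dict.empty hn hpre hc
  have hAfold :
      mp.foldl (fun d p =>
          (d.modify p.1.1 PySem.Set.empty (fun s => PySem.Set.add s p.2.1)).modify p.1.2
            PySem.Set.empty (fun s => PySem.Set.add s p.2.2))
        (pvLift PySem.Dict.empty)
        = pvLift ((pvEntries mp).foldl pvCStep PySem.Dict.empty) :=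
    (pvFoldl_pairs_eq_entries
      (fun (a : PySem.Dict Int (PySem.Set Int)) (e : Int × Int) =>
        a.modify e.1 PySem.Set.empty (fun s => PySem.Set.add s e.2)) mp _).trans hA
  have hBfold :
      mp.foldl (fun st p =>
          (st.bind (fun d => pvBStep d p.1.1 p.2.1)).bind (fun d => pvBStep d p.1.2 p.2.2))
        (some PySem.Dict.empty)
        = some ((pvEntries mp).foldl pvCStep PySem.Dict.empty) :=
    (pvFoldl_pairs_eq_entries
      (fun (st : Option (PySem.Dict Int Int)) (e : Int × Int) =>
        st.bind (fun d => pvBStep d e.1 e.2)) mp _).trans hB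
  have hEmpty : pvLift PySem.Dict.empty = PySem.Dict.empty := rfl
  rw [hEmpty] at hAfold
  simp only [hAfold, hBfold]
  have hval : ((pvLift ((pvEntries mp).foldl pvCStep PySem.Dict.empty)).values.any
      (fun v => v.length > 1)) = false := by
    simp [pvLift, PySem.Dict.values, List.any_map, Function.comp_def]
  rw [hval]
  simp [pvLift, List.map_map, Function.comp_def]
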